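-- pv_equiv track=rewrite | github.com/Mihalache-Mihai/BioInformatics | proj6/main.py | countX
-- ===== SOURCE A (Python) =====
-- def countX(l,v):
--     if v<0:
--         return v
--     res=0
--     while v>=0:
--         if l[res]!='p':
--             v-=1
--         res+=1
--     return res-1
-- ===== SOURCE B (Python) =====
-- def countX(l, v):
--     if v < 0:
--         return v
--     idx = [i for i, x in enumerate(l) if x != 'p']
--     return idx[v]
-- ===== Notes on version B (the rewrite author's own statement) =====
-- stated objective: simpler
-- what changed: Replaces the streaming scan that decrements v and stops early with building the full index table of non-'p' positions and a single list lookup idx[v].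
import Mathlib
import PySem

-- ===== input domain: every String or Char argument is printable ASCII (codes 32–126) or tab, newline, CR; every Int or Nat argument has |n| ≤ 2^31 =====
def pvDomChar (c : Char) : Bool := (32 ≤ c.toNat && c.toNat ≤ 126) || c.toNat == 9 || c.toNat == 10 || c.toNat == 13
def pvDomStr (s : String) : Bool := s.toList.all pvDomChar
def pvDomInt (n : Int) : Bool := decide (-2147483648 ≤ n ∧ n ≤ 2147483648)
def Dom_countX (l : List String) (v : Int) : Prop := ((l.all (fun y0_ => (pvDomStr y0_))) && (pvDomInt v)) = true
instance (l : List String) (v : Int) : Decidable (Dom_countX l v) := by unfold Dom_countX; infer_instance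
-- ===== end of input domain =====

-- B builds the full index table of non-'p' positions and looks up entry v, instead of A's
-- streaming scan that decrements v; return values agree wherever A returns (objective: simpler).

-- ===== PORT A =====
-- the while loop: res is the cursor, v the remaining count; l[res] out of range = IndexError
-- (excluded by Pre_), the port returns 0 there.
def countXloop (l : List String) (res : Nat) (v : Int) : Int :=
  if v ≥ 0 then
    match h : l[res]? with
    | none => 0
    | some x => countXloop l (res + 1) (if x ≠ "p" then v - 1 else v)
  else (res : Int) - 1
termination_by l.length - res
decreasing_by
  have : res < l.length := List.getElem?_eq_some_iff.mp h |>.1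
  omega

def countX (l : List String) (v : Int) : Int :=
  if v < 0 then v else countXloop l 0 v

-- ===== PORT B =====
-- [i for i, x in enumerate(l) if x != 'p'] with the enumerate counter carried explicitly
def buildIdx : List String → Nat → List Int
  | [], _ => []
  | x :: t, i => if x ≠ "p" then (i : Int) :: buildIdx t (i + 1) else buildIdx t (i + 1)

def countX_alt (l : List String) (v : Int) : Int :=
  if v < 0 then v
  else
    match PySem.List.pyGet? (buildIdx l 0) v with
    | some r => r
    | none => 0   -- IndexError in Python, excluded by Pre_

-- ===== PRECONDITION & SPEC =====
-- excluded: v ≥ 0 with at most v non-'p' elements — Python A (and B) raise IndexError there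
def Pre_countX (l : List String) (v : Int) : Prop :=
  v < 0 ∨ v < (l.countP (fun s => s ≠ "p") : Int)
instance (l : List String) (v : Int) : Decidable (Pre_countX l v) := by
  unfold Pre_countX; infer_instance

def pvWitness_countX : List String × Int := (["a", "p", "b"], 1)

def Spec_countX (l : List String) (v : Int) (out : Int) : Prop := out = countX_alt l v
instance (l : List String) (v : Int) (out : Int) : Decidable (Spec_countX l v out) := by
  unfold Spec_countX; infer_instance

-- ===== CLAIM (what is proved, stated in full; the proofs are below) =====
def Claim_equal_countX : Prop :=
  ∀ (l : List String) (v : Int), Dom_countX l v → Pre_countX l v → Spec_countX l v (countX l v)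

-- ===== LEMMAS AND PROOFS =====

-- abstract version of A's loop over the suffix it has not consumed yet
def auxLoop : List String → Int → Nat → Int
  | [], v, res => if v ≥ 0 then 0 else (res : Int) - 1
  | x :: t, v, res =>
    if v ≥ 0 then auxLoop t (if x ≠ "p" then v - 1 else v) (res + 1)
    else (res : Int) - 1

theorem auxLoop_neg (xs : List String) (v : Int) (i : Nat) (h : v < 0) :
    auxLoop xs v i = (i : Int) - 1 := by
  cases xs <;> simp [auxLoop, not_le.mpr h]

theorem countXloop_eq_aux (l : List String) (res : Nat) (v : Int) :
    countXloop l res v = auxLoop (l.drop res) v res := by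
  induction hn : l.length - res using Nat.strong_induction_on generalizing res v with
  | _ n ih =>
    rw [countXloop]
    by_cases hv : v ≥ 0
    · simp only [hv, if_pos]
      cases hget : l[res]? with
      | none =>
        have hle : l.length ≤ res := List.getElem?_eq_none_iff.mp hget
        rw [List.drop_eq_nil_of_le hle]
        simp [auxLoop, hv]
      | some x =>
        have hlt : res < l.length := (List.getElem?_eq_some_iff.mp hget).1
        have hdrop : l.drop res = x :: l.drop (res + 1) := by
          rw [List.drop_eq_getElem_cons hlt]
          simp [(List.getElem?_eq_some_iff.mp hget).2]
        rw [hdrop, auxLoop]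
        simp only [hv, if_pos]
        exact ih (l.length - (res + 1)) (by omega) (res + 1) _ rfl
    · rw [auxLoop_neg (l.drop res) v res (by omega)]
      simp [hv]


theorem aux_eq_lookup (xs : List String) (v : Int) (i : Nat) (hv : 0 ≤ v) :
    auxLoop xs v i =
      match (buildIdx xs i)[v.toNat]? with
      | some r => r
      | none => 0 := by
  induction xs generalizing v i with
  | nil => simp [auxLoop, hv, buildIdx]
  | cons x t ih =>
    rw [auxLoop]
    simp only [hv, if_pos]
    by_cases hx : x = "p"
    · simp only [buildIdx, hx, ne_eq, not_true_eq_false, if_false]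
      simpa using ih v (i + 1) hv
    · simp only [buildIdx, ne_eq, hx, not_false_eq_true, if_true]
      by_cases h0 : v = 0
      · subst h0
        rw [auxLoop_neg t (0 - 1) (i + 1) (by omega)]
        norm_num
      · have hv1 : 0 ≤ v - 1 := by omega
        rw [ih (v - 1) (i + 1) hv1]
        have ht : v.toNat = (v - 1).toNat + 1 := by omega
        rw [ht]
        simp

-- ===== VERDICT (by name: the statement is the Claim_ definition above) =====
theorem countX_spec : Claim_equal_countX := by
  intro l v _ _
  unfold Spec_countX countX countX_alt
  by_cases hv : v < 0
  · simp [hv]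
  · simp only [hv, if_false]
    have h0 : (0 : Int) ≤ v := by omega
    rw [countXloop_eq_aux, List.drop_zero, aux_eq_lookup l v 0 h0,
      PySem.List.pyGet?_of_nonneg _ h0]
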